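-- pv_equiv track=rewrite | github.com/MaasterCode/grammarFormatTranslator | grammarFormatTranslator.py | jflap_to_calgary
-- ===== SOURCE A (Python) =====
-- def jflap_to_calgary(input_string):
--     """
--     Converts a given string from a specific format to the Calgary grammar format.
--     """
--     lines = input_string.split('\n')
--     converted_lines = []
--     current_head = None
--
--     for line in lines:
--         parts = line.split('\t')
--         if len(parts) >= 3:
--             left_side = parts[0].strip()
--             right_side = ' '.join(parts[2].strip()) if parts[2].strip() else ' '  # Espacio entre cada carácter
--
--             if current_head == left_side:
--                 # Si es el mismo encabezado, agregar '|' y la producción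
--                 converted_lines[-1] += '\n  | ' + right_side
--             else:
--                 # Si es un nuevo encabezado, agregar con '->'
--                 if current_head is not None:  # Agregar un punto si no es la primera línea
--                     converted_lines[-1] += '.'
--                 converted_lines.append(left_side + ' -> ' + right_side)
--                 current_head = left_side
--
--     # Agregando un punto al final de la última línea
--     if converted_lines:
--         converted_lines[-1] += '.'
--
--     return '\n'.join(converted_lines)
-- ===== SOURCE B (Python) =====
-- def _parse(line):
--     """A JFLAP line 'left \t -> \t right' becomes a (head, production) pair; others are dropped."""
--     parts = line.split('\t')
--     if len(parts) < 3:
--         return None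
--     r = parts[2].strip()
--     return (parts[0].strip(), ' '.join(r) if r else ' ')
--
--
-- def _group(pairs):
--     """Group consecutive pairs with the same head, recursing on the tail."""
--     if not pairs:
--         return []
--     (l, r), rest = pairs[0], pairs[1:]
--     grouped = _group(rest)
--     if grouped and grouped[0][0] == l:
--         return [(l, [r] + grouped[0][1])] + grouped[1:]
--     return [(l, [r])] + grouped
--
--
-- def jflap_to_calgary(input_string):
--     pairs = [p for p in map(_parse, input_string.split('\n')) if p is not None]
--     groups = _group(pairs)
--     return '\n'.join(l + ' -> ' + '\n  | '.join(rs) + '.' for l, rs in groups)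
-- ===== Notes on version B (the rewrite author's own statement) =====
-- stated objective: alternative
-- what changed: Replaces A's single stateful pass (mutating the last emitted line and tracking current_head) by a three-stage pipeline: parse every valid line into a (head, production) pair, group consecutive equal-head pairs by recursion on the tail, then format each group independently with a uniform trailing dot.
import Mathlib
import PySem

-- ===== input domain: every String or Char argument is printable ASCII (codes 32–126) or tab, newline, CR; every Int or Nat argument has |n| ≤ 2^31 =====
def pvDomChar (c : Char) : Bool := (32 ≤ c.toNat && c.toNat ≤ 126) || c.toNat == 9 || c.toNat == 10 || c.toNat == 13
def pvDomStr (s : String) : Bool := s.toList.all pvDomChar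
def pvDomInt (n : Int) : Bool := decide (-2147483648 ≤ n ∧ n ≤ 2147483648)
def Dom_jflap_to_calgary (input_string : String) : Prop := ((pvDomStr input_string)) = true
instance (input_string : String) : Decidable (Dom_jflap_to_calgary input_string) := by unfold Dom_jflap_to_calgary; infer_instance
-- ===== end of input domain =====

-- B replaces A's single stateful pass (mutating the last emitted line) by a parse → group-consecutive → format pipeline (objective: alternative decomposition, same cost).

-- ===== PORT A =====
-- converted_lines[-1] += s  (A only reaches this with a nonempty list; [] is kept unchanged)
def pvAppendLast (cl : List (List Char)) (s : List Char) : List (List Char) :=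
  match cl with
  | [] => []
  | [x] => [x ++ s]
  | x :: xs => x :: pvAppendLast xs s

def jflap_to_calgary (input_string : String) : String :=
  let lines := PySem.Chars.splitOn input_string.toList ['\n']
  let st := lines.foldl (fun (st : List (List Char) × Option (List Char)) line =>
    let parts := PySem.Chars.splitOn line ['\t']
    if 3 ≤ parts.length then
      let left_side := PySem.Chars.strip (parts.getD 0 [])
      let r := PySem.Chars.strip (parts.getD 2 [])
      let right_side := if r ≠ [] then PySem.Chars.join [' '] (r.map (fun c => [c])) else [' ']
      if st.2 = some left_side then
        (pvAppendLast st.1 (['\n', ' ', ' ', '|', ' '] ++ right_side), st.2)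
      else
        ((if st.2 ≠ none then pvAppendLast st.1 ['.'] else st.1)
          ++ [left_side ++ [' ', '-', '>', ' '] ++ right_side], some left_side)
    else st) ([], none)
  let cl := if st.1 ≠ [] then pvAppendLast st.1 ['.'] else st.1
  String.ofList (PySem.Chars.join ['\n'] cl)

-- ===== PORT B =====
def pvParse? (line : List Char) : Option (List Char × List Char) :=
  let parts := PySem.Chars.splitOn line ['\t']
  if parts.length < 3 then none
  else
    let r := PySem.Chars.strip (parts.getD 2 [])
    some (PySem.Chars.strip (parts.getD 0 []),
          if r ≠ [] then PySem.Chars.join [' '] (r.map (fun c => [c])) else [' '])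

def pvGroup : List (List Char × List Char) → List (List Char × List (List Char))
  | [] => []
  | (l, r) :: rest =>
    match pvGroup rest with
    | (l', rs) :: gs => if l' = l then (l, r :: rs) :: gs else (l, [r]) :: (l', rs) :: gs
    | [] => [(l, [r])]

def pvRender (g : List Char × List (List Char)) : List Char :=
  g.1 ++ [' ', '-', '>', ' '] ++ PySem.Chars.join ['\n', ' ', ' ', '|', ' '] g.2 ++ ['.']

def jflap_to_calgary_alt (input_string : String) : String :=
  let pairs := ((PySem.Chars.splitOn input_string.toList ['\n']).map pvParse?).filterMap id
  String.ofList (PySem.Chars.join ['\n'] ((pvGroup pairs).map pvRender))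

-- ===== PRECONDITION & SPEC =====
def Spec_jflap_to_calgary (input_string : String) (out : String) : Prop := out = jflap_to_calgary_alt input_string
instance (input_string : String) (out : String) : Decidable (Spec_jflap_to_calgary input_string out) := by unfold Spec_jflap_to_calgary; infer_instance

-- ===== CLAIM (what is proved, stated in full; the proofs are below) =====
def Claim_equal_jflap_to_calgary : Prop := ∀ (input_string : String), Dom_jflap_to_calgary input_string → Spec_jflap_to_calgary input_string (jflap_to_calgary input_string)

-- ===== LEMMAS AND PROOFS =====

-- A's loop body, expressed on an already-parsed pair.
def pvStepP (st : List (List Char) × Option (List Char)) (p : List Char × List Char) :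
    List (List Char) × Option (List Char) :=
  if st.2 = some p.1 then
    (pvAppendLast st.1 (['\n', ' ', ' ', '|', ' '] ++ p.2), st.2)
  else
    ((if st.2 ≠ none then pvAppendLast st.1 ['.'] else st.1)
      ++ [p.1 ++ [' ', '-', '>', ' '] ++ p.2], some p.1)

def pvFinalize (cl : List (List Char)) : List (List Char) :=
  if cl ≠ [] then pvAppendLast cl ['.'] else cl

def pvExtend (rs : List (List Char)) : List Char :=
  (rs.map (['\n', ' ', ' ', '|', ' '] ++ ·)).flatten

theorem pvAppendLast_ne_nil (cl : List (List Char)) (a : List Char) (h : cl ≠ []) :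
    pvAppendLast cl a ≠ [] := by
  cases cl with
  | nil => exact absurd rfl h
  | cons x xs => cases xs <;> simp [pvAppendLast]

theorem pvAppendLast_cons_of_ne_nil (x : List Char) (z : List (List Char)) (b : List Char)
    (h : z ≠ []) : pvAppendLast (x :: z) b = x :: pvAppendLast z b := by
  cases z with
  | nil => exact absurd rfl h
  | cons y ys => rfl

theorem pvAppendLast_appendLast (cl : List (List Char)) (a b : List Char) :
    pvAppendLast (pvAppendLast cl a) b = pvAppendLast cl (a ++ b) := by
  induction cl with
  | nil => rfl
  | cons x xs ih =>
    cases xs with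
    | nil => simp [pvAppendLast]
    | cons y ys =>
      have h : pvAppendLast (y :: ys) a ≠ [] := pvAppendLast_ne_nil _ _ (by simp)
      rw [pvAppendLast_cons_of_ne_nil x (y :: ys) a (by simp),
          pvAppendLast_cons_of_ne_nil x _ b h,
          pvAppendLast_cons_of_ne_nil x (y :: ys) (a ++ b) (by simp), ih]

theorem pvAppendLast_snoc (xs : List (List Char)) (y z : List Char) :
    pvAppendLast (xs ++ [y]) z = xs ++ [y ++ z] := by
  induction xs with
  | nil => rfl
  | cons x ws ih =>
    rw [List.cons_append, pvAppendLast_cons_of_ne_nil x (ws ++ [y]) z (by simp), ih,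
        List.cons_append]

theorem pvFinalize_appendLast (cl : List (List Char)) (a : List Char) :
    pvFinalize (pvAppendLast cl a) = pvAppendLast cl (a ++ ['.']) := by
  cases cl with
  | nil => rfl
  | cons x xs =>
    have h : pvAppendLast (x :: xs) a ≠ [] := pvAppendLast_ne_nil _ _ (by simp)
    simp only [pvFinalize, ne_eq, h, not_false_iff, if_pos, pvAppendLast_appendLast]

theorem pvFinalize_snoc (xs : List (List Char)) (y : List Char) :
    pvFinalize (xs ++ [y]) = xs ++ [y ++ ['.']] := by
  have h : xs ++ [y] ≠ [] := by simp
  simp only [pvFinalize, ne_eq, h, not_false_iff, if_pos, pvAppendLast_snoc]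

theorem pvJoin_cons (r : List Char) (rs : List (List Char)) :
    PySem.Chars.join ['\n', ' ', ' ', '|', ' '] (r :: rs) = r ++ pvExtend rs := by
  induction rs generalizing r with
  | nil => simp [PySem.Chars.join_singleton, pvExtend]
  | cons q qs ih =>
    rw [PySem.Chars.join_cons_cons, ih]
    simp [pvExtend]

-- A's folded-and-finalized state, in terms of B's consecutive grouping of the remaining pairs.
theorem pvMain (ps : List (List Char × List Char)) :
    ∀ (cl : List (List Char)) (ch : Option (List Char)),
    pvFinalize (ps.foldl pvStepP (cl, ch)).1 =
      match pvGroup ps with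
      | [] => pvFinalize cl
      | (l, rs) :: gs =>
        if ch = some l then
          pvAppendLast cl (pvExtend rs ++ ['.']) ++ gs.map pvRender
        else
          (if ch ≠ none then pvAppendLast cl ['.'] else cl) ++ ((l, rs) :: gs).map pvRender := by
  induction ps with
  | nil => intro cl ch; rfl
  | cons p ps ih =>
    obtain ⟨l, r⟩ := p
    intro cl ch
    rw [List.foldl_cons, ih]
    cases hg : pvGroup ps with
    | nil =>
      simp only [pvGroup, hg]
      by_cases hch : ch = some l
      · simp only [pvStepP, hch]
        simp [pvFinalize_appendLast, pvExtend]
      · simp only [pvStepP, if_neg hch, pvFinalize_snoc]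
        simp [pvRender, PySem.Chars.join_singleton]
    | cons g gs =>
      obtain ⟨l1, rs1⟩ := g
      simp only [pvGroup, hg]
      by_cases hll : l1 = l
      · subst hll
        by_cases hch : ch = some l1
        · simp only [pvStepP, hch]
          simp [pvAppendLast_appendLast, pvExtend]
        · simp only [pvStepP, if_neg hch, pvAppendLast_snoc]
          simp [hch, pvExtend, pvRender, pvJoin_cons]
      · have hne : (some l : Option (List Char)) ≠ some l1 := by
          intro h; exact hll (Option.some.injEq l l1 ▸ h).symm
        simp only [if_neg hll]
        by_cases hch : ch = some l
        · simp only [pvStepP, hch]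
          have hsn : (some l : Option (List Char)) ≠ none := by simp
          have hll' : l ≠ l1 := fun h => hll h.symm
          simp only [ne_eq, hsn, not_false_iff, if_pos, pvAppendLast_appendLast]
          simp [hll', pvExtend, pvRender]
        · simp only [pvStepP, if_neg hch, if_neg hne]
          have hsn : (some l : Option (List Char)) ≠ none := by simp
          simp only [ne_eq, hsn, not_false_iff, if_pos, pvAppendLast_snoc]
          simp [pvRender]

-- A's inlined loop body agrees with parse-then-step.
theorem pvStepA_eq (st : List (List Char) × Option (List Char)) (line : List Char) :
    (let parts := PySem.Chars.splitOn line ['\t']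
     if 3 ≤ parts.length then
       let left_side := PySem.Chars.strip (parts.getD 0 [])
       let r := PySem.Chars.strip (parts.getD 2 [])
       let right_side := if r ≠ [] then PySem.Chars.join [' '] (r.map (fun c => [c])) else [' ']
       if st.2 = some left_side then
         (pvAppendLast st.1 (['\n', ' ', ' ', '|', ' '] ++ right_side), st.2)
       else
         ((if st.2 ≠ none then pvAppendLast st.1 ['.'] else st.1)
           ++ [left_side ++ [' ', '-', '>', ' '] ++ right_side], some left_side)
     else st)
    = match pvParse? line with
      | some p => pvStepP st p
      | none => st := by
  simp only [pvParse?, pvStepP]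
  by_cases h : 3 ≤ (PySem.Chars.splitOn line ['\t']).length
  · have h' : ¬ (PySem.Chars.splitOn line ['\t']).length < 3 := by omega
    simp [h, h']
  · have h' : (PySem.Chars.splitOn line ['\t']).length < 3 := by omega
    simp [h, h']

-- A's whole pipeline on a line list equals B's group-and-render pipeline.
theorem pvResult (lines : List (List Char)) :
    (let st := lines.foldl (fun (st : List (List Char) × Option (List Char)) line =>
      let parts := PySem.Chars.splitOn line ['\t']
      if 3 ≤ parts.length then
        let left_side := PySem.Chars.strip (parts.getD 0 [])
        let r := PySem.Chars.strip (parts.getD 2 [])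
        let right_side := if r ≠ [] then PySem.Chars.join [' '] (r.map (fun c => [c])) else [' ']
        if st.2 = some left_side then
          (pvAppendLast st.1 (['\n', ' ', ' ', '|', ' '] ++ right_side), st.2)
        else
          ((if st.2 ≠ none then pvAppendLast st.1 ['.'] else st.1)
            ++ [left_side ++ [' ', '-', '>', ' '] ++ right_side], some left_side)
      else st) ([], none)
     let cl := if st.1 ≠ [] then pvAppendLast st.1 ['.'] else st.1
     cl) = (pvGroup ((lines.map pvParse?).filterMap id)).map pvRender := by
  have hbody : (fun (st : List (List Char) × Option (List Char)) line =>
      let parts := PySem.Chars.splitOn line ['\t']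
      if 3 ≤ parts.length then
        let left_side := PySem.Chars.strip (parts.getD 0 [])
        let r := PySem.Chars.strip (parts.getD 2 [])
        let right_side := if r ≠ [] then PySem.Chars.join [' '] (r.map (fun c => [c])) else [' ']
        if st.2 = some left_side then
          (pvAppendLast st.1 (['\n', ' ', ' ', '|', ' '] ++ right_side), st.2)
        else
          ((if st.2 ≠ none then pvAppendLast st.1 ['.'] else st.1)
            ++ [left_side ++ [' ', '-', '>', ' '] ++ right_side], some left_side)
      else st)
      = (fun (st : List (List Char) × Option (List Char)) line =>
          match pvParse? line with
          | some p => pvStepP st p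
          | none => st) :=
    funext fun st => funext fun line => pvStepA_eq st line
  show pvFinalize (lines.foldl (fun (st : List (List Char) × Option (List Char)) line =>
      let parts := PySem.Chars.splitOn line ['\t']
      if 3 ≤ parts.length then
        let left_side := PySem.Chars.strip (parts.getD 0 [])
        let r := PySem.Chars.strip (parts.getD 2 [])
        let right_side := if r ≠ [] then PySem.Chars.join [' '] (r.map (fun c => [c])) else [' ']
        if st.2 = some left_side then
          (pvAppendLast st.1 (['\n', ' ', ' ', '|', ' '] ++ right_side), st.2)
        else
          ((if st.2 ≠ none then pvAppendLast st.1 ['.'] else st.1)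
            ++ [left_side ++ [' ', '-', '>', ' '] ++ right_side], some left_side)
      else st) ([], none)).1
      = (pvGroup ((lines.map pvParse?).filterMap id)).map pvRender
  rw [hbody]
  have hfm : (lines.map pvParse?).filterMap id = lines.filterMap pvParse? := by
    simp
  rw [hfm]
  have hfold : ∀ (ls : List (List Char)) (st : List (List Char) × Option (List Char)),
      ls.foldl (fun (st : List (List Char) × Option (List Char)) line =>
          match pvParse? line with
          | some p => pvStepP st p
          | none => st) st
        = (ls.filterMap pvParse?).foldl pvStepP st := by
    intro ls
    induction ls with
    | nil => intro st; rfl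
    | cons x xs ih =>
      intro st
      cases h : pvParse? x <;> simp [h, ih]
  rw [hfold, pvMain]
  cases hg : pvGroup (lines.filterMap pvParse?) with
  | nil => rfl
  | cons g gs =>
    obtain ⟨l, rs⟩ := g
    have h1 : (none : Option (List Char)) ≠ some l := by simp
    simp [h1]

-- ===== VERDICT (by name: the statement is the Claim_ definition above) =====
theorem jflap_to_calgary_spec : Claim_equal_jflap_to_calgary := by
  intro input_string _
  show jflap_to_calgary input_string = jflap_to_calgary_alt input_string
  unfold jflap_to_calgary jflap_to_calgary_alt
  exact congrArg String.ofList
    (congrArg (PySem.Chars.join ['\n'])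
      (pvResult (PySem.Chars.splitOn input_string.toList ['\n'])))
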